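-- pv_equiv track=rewrite | github.com/cha-suaysom/TwitterResearch | utilitiesTrain.py | putTimeInBox
-- ===== SOURCE A (Python) =====
-- def putTimeInBox(hourList):
-- 	ans = list(range(24))
-- 	for i in range(len(ans)):
-- 		ans[i] = []
-- 	for i in range(len(hourList)):
-- 		ans[hourList[i]].append(i)
-- 	for i in range(len(ans)):
-- 		ans[i] = len(ans[i])
-- 	return ans
-- ===== SOURCE B (Python) =====
-- def putTimeInBox(hourList):
--     ans = [0] * 24
--     for h in hourList:
--         ans[h] += 1
--     return ans
-- ===== Notes on version B (the rewrite author's own statement) =====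
-- stated objective: simpler
-- what changed: Replaces the three passes over a bucket structure (initialize 24 buckets, append each position's index into its hour's bucket, then collapse every bucket to its length) with a single tally pass that maintains integer counts directly in a length-24 zero-initialized tally list.
import Mathlib
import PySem

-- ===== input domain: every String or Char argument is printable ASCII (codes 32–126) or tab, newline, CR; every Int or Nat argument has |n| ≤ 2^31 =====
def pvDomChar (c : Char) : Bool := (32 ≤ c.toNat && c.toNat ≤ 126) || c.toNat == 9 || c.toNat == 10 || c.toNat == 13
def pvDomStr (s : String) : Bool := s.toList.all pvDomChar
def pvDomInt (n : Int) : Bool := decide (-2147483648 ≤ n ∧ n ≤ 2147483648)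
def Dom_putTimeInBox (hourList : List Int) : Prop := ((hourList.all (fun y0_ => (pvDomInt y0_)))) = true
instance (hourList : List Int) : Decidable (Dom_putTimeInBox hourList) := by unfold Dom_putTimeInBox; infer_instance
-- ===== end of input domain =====

-- B replaces A's three passes over a bucket-of-indices structure by one tally pass that keeps
-- integer counts directly (objective: simpler).

-- ===== PORT A =====
-- Python A builds 'ans = list(range(24))' and the first loop immediately overwrites every slot
-- with []; the two statements are heterogeneous in Python's untyped list, so the port starts from
-- their combined result: one empty bucket per element of range(24).
def putTimeInBox (hourList : List Int) : List Int :=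
  let ans0 : List (List Int) := (PySem.List.pyRange 0 24).map (fun _ => ([] : List Int))
  -- for i in range(len(hourList)): ans[hourList[i]].append(i)
  -- (in-place append modelled as read-modify-write; hourList[i] may be negative: Python indexing)
  let ans1 := (PySem.List.pyRange 0 (hourList.length : Int)).foldl
    (fun ans i =>
      PySem.List.pySetD ans (PySem.List.pyGetD hourList i 0)
        (PySem.List.pyGetD ans (PySem.List.pyGetD hourList i 0) [] ++ [i])) ans0
  -- for i in range(len(ans)): ans[i] = len(ans[i])  (heterogeneous overwrite again: ported as
  -- replacing each bucket by its length, slot by slot)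
  ans1.map (fun b => (b.length : Int))

-- ===== PORT B =====
def putTimeInBox_alt (hourList : List Int) : List Int :=
  -- a length-24 zero tally; for h in hourList: ans[h] += 1  (in-place += modelled as read-modify-write)
  hourList.foldl
    (fun ans h => PySem.List.pySetD ans h (PySem.List.pyGetD ans h 0 + 1))
    (PySem.List.pyRepeat [(0 : Int)] 24)

-- ===== PRECONDITION & SPEC =====
-- Both Pythons raise IndexError as soon as some hour lies outside [-24, 24) (the tally/bucket
-- list has length 24); Pre_ excludes exactly those inputs.
def Pre_putTimeInBox (hourList : List Int) : Prop :=
  ∀ h ∈ hourList, -24 ≤ h ∧ h < 24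
instance (hourList : List Int) : Decidable (Pre_putTimeInBox hourList) := by
  unfold Pre_putTimeInBox; infer_instance

def pvWitness_putTimeInBox : List Int := [0, 23, -1, -24, 0]

def Spec_putTimeInBox (hourList : List Int) (out : List Int) : Prop := out = putTimeInBox_alt hourList
instance (hourList : List Int) (out : List Int) : Decidable (Spec_putTimeInBox hourList out) := by unfold Spec_putTimeInBox; infer_instance

-- ===== CLAIM (what is proved, stated in full; the proofs are below) =====
def Claim_equal_putTimeInBox : Prop := ∀ (hourList : List Int), Dom_putTimeInBox hourList → Pre_putTimeInBox hourList → Spec_putTimeInBox hourList (putTimeInBox hourList)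

-- ===== LEMMAS AND PROOFS =====

-- the slot Python's negative-index rule assigns to index h in a list of length 24
def pvBin (h : Int) : Nat := (if h < 0 then h + 24 else h).toNat

lemma pvSetD_bin {α : Type} (ans : List α) (h : Int) (v : α)
    (h1 : -24 ≤ h) (h2 : h < 24) (hlen : ans.length = 24) :
    PySem.List.pySetD ans h v = ans.set (pvBin h) v := by
  unfold pvBin
  rcases lt_or_ge h 0 with hn | hp
  · simp [PySem.List.pySetD, PySem.List.pySet?, PySem.List.pyIdx?, hlen,
          not_le.mpr hn, h1, hn]
    congr 1
    omega
  · rw [PySem.List.pySetD_of_nonneg ans v hp]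
    simp [not_lt.mpr hp]

lemma pvGetD_bin {α : Type} (ans : List α) (h : Int) (d : α)
    (h1 : -24 ≤ h) (h2 : h < 24) (hlen : ans.length = 24) :
    PySem.List.pyGetD ans h d = ans.getD (pvBin h) d := by
  unfold pvBin
  rcases lt_or_ge h 0 with hn | hp
  · simp [PySem.List.pyGetD, PySem.List.pyGet?, PySem.List.pyIdx?, hlen,
          not_le.mpr hn, h1, hn, List.getD]
    congr 2
    omega
  · rw [PySem.List.pyGetD_of_nonneg ans d hp]
    simp [not_lt.mpr hp]

lemma pvBin_lt (h : Int) (h1 : -24 ≤ h) (h2 : h < 24) : pvBin h < 24 := by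
  unfold pvBin; split <;> omega

-- A's second loop, as a fold over (index, hour) pairs
def pvStep (ans : List (List Int)) (p : Int × Int) : List (List Int) :=
  PySem.List.pySetD ans p.2 (PySem.List.pyGetD ans p.2 [] ++ [p.1])

lemma pvLoop_length (pairs : List (Int × Int)) (ans : List (List Int)) :
    (pairs.foldl pvStep ans).length = ans.length := by
  induction pairs generalizing ans with
  | nil => rfl
  | cons p t ih => simp [List.foldl_cons, ih, pvStep, PySem.List.length_pySetD]

-- A's loop invariant: each bucket's length grows by the number of processed hours in its bin
lemma pvLoop_getD (pairs : List (Int × Int)) (ans : List (List Int))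
    (hlen : ans.length = 24) (hb : ∀ p ∈ pairs, -24 ≤ p.2 ∧ p.2 < 24) (j : Nat) (hj : j < 24) :
    ((pairs.foldl pvStep ans).getD j []).length
      = (ans.getD j []).length + pairs.countP (fun p => pvBin p.2 == j) := by
  induction pairs generalizing ans with
  | nil => simp
  | cons p t ih =>
    obtain ⟨hp1, hp2⟩ := hb p (List.mem_cons_self)
    have hbin := pvBin_lt p.2 hp1 hp2
    rw [List.foldl_cons]
    rw [ih (pvStep ans p)
        (by simp [pvStep, PySem.List.length_pySetD, hlen])
        (fun q hq => hb q (List.mem_cons_of_mem _ hq))]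
    rw [List.countP_cons]
    rw [show pvStep ans p = ans.set (pvBin p.2) (ans.getD (pvBin p.2) [] ++ [p.1]) from by
      rw [pvStep, pvSetD_bin ans p.2 _ hp1 hp2 hlen, pvGetD_bin ans p.2 _ hp1 hp2 hlen]]
    rw [List.getD_eq_getElem _ _ (by simp [hlen]; omega),
        List.getD_eq_getElem _ _ (by omega : j < ans.length),
        List.getElem_set]
    by_cases hEq : pvBin p.2 = j
    · rw [if_pos hEq, hEq, List.getD_eq_getElem _ _ (by omega : j < ans.length)]
      simp
      omega
    · simp [hEq]

lemma pvTally_length (l : List Int) (ans : List Int) :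
    (l.foldl (fun a h => PySem.List.pySetD a h (PySem.List.pyGetD a h 0 + 1)) ans).length
      = ans.length := by
  induction l generalizing ans with
  | nil => rfl
  | cons h t ih => simp [List.foldl_cons, ih, PySem.List.length_pySetD]

-- B's loop invariant: each tally slot grows by the number of processed hours in its bin
lemma pvTally_getD (l : List Int) (ans : List Int)
    (hlen : ans.length = 24) (hb : ∀ h ∈ l, -24 ≤ h ∧ h < 24) (j : Nat) (hj : j < 24) :
    (l.foldl (fun a h => PySem.List.pySetD a h (PySem.List.pyGetD a h 0 + 1)) ans).getD j 0
      = ans.getD j 0 + (l.countP (fun h => pvBin h == j) : Int) := by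
  induction l generalizing ans with
  | nil => simp
  | cons h t ih =>
    obtain ⟨hp1, hp2⟩ := hb h (List.mem_cons_self)
    have hbin := pvBin_lt h hp1 hp2
    rw [List.foldl_cons]
    rw [ih (PySem.List.pySetD ans h (PySem.List.pyGetD ans h 0 + 1))
        (by simp [PySem.List.length_pySetD, hlen])
        (fun q hq => hb q (List.mem_cons_of_mem _ hq))]
    rw [List.countP_cons]
    rw [pvSetD_bin ans h _ hp1 hp2 hlen, pvGetD_bin ans h 0 hp1 hp2 hlen]
    rw [List.getD_eq_getElem _ _ (by simp [hlen]; omega),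
        List.getD_eq_getElem _ _ (by omega : j < ans.length),
        List.getElem_set]
    by_cases hEq : pvBin h = j
    · rw [if_pos hEq, hEq, List.getD_eq_getElem _ _ (by omega : j < ans.length)]
      simp
      omega
    · simp [hEq]

-- ===== VERDICT (by name: the statement is the Claim_ definition above) =====
theorem putTimeInBox_spec : Claim_equal_putTimeInBox := by
  intro hourList _ hpre
  unfold Spec_putTimeInBox putTimeInBox putTimeInBox_alt
  dsimp only
  set ans0 : List (List Int) := (PySem.List.pyRange 0 24).map (fun _ => ([] : List Int)) with hans0
  have hlen0 : ans0.length = 24 := by rw [hans0]; rfl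
  -- rewrite A's index loop as a fold over enumerate
  have henum : (PySem.List.pyRange 0 (hourList.length : Int)).foldl
      (fun ans i =>
        PySem.List.pySetD ans (PySem.List.pyGetD hourList i 0)
          (PySem.List.pyGetD ans (PySem.List.pyGetD hourList i 0) [] ++ [i])) ans0
      = (PySem.List.enumerate hourList).foldl pvStep ans0 := by
    rw [PySem.List.enumerate_eq_map_pyRange hourList 0, List.foldl_map]
    rfl
  rw [henum]
  have hbounds : ∀ p ∈ PySem.List.enumerate hourList, -24 ≤ p.2 ∧ p.2 < 24 := by
    intro p hp
    have : p.2 ∈ hourList := by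
      rw [← PySem.List.map_snd_enumerate hourList 0]
      exact List.mem_map_of_mem hp
    exact hpre _ this
  have hrep : (PySem.List.pyRepeat [(0 : Int)] 24).length = 24 := by rfl
  apply List.ext_getElem
  · simp [pvLoop_length, pvTally_length, hlen0]
  · intro j hj1 hj2
    have hj : j < 24 := by
      simpa [pvLoop_length, hlen0] using hj1
    simp only [List.getElem_map]
    rw [← List.getD_eq_getElem _ ([] : List Int)
          (by simpa [pvLoop_length, hlen0] using hj),
        ← List.getD_eq_getElem _ (0 : Int)
          (by simpa [pvTally_length, hrep] using hj)]
    rw [pvLoop_getD _ ans0 hlen0 hbounds j hj,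
        pvTally_getD hourList _ hrep hpre j hj]
    have hz : (ans0.getD j []).length = 0 := by
      rw [hans0, List.getD_eq_getElem _ _ (by simpa using hj)]
      simp only [List.getElem_map]
      rfl
    have hz' : (PySem.List.pyRepeat [(0 : Int)] 24).getD j 0 = 0 := by
      rw [PySem.List.pyRepeat_singleton, List.getD_eq_getElem _ _ (by simpa using hj)]
      simp only [List.getElem_replicate]
    rw [hz, hz']
    have hcount : (PySem.List.enumerate hourList).countP (fun p => pvBin p.2 == j)
        = hourList.countP (fun h => pvBin h == j) := by
      conv_rhs => rw [← PySem.List.map_snd_enumerate hourList 0]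
      rw [List.countP_map]
      rfl
    rw [hcount]
    omega
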